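-- pv_equiv track=rewrite | github.com/fabric-testbed/fabric_ceph | fabric_ceph/utils/cluster_user_helper.py | _format_mds_caps
-- ===== SOURCE A (Python) =====
-- from typing import Any, Dict, List, Optional
-- from typing import Tuple
--
-- _PERM_ORDER = {"r": 0, "rw": 1, "rwps": 2}
--
-- def _format_mds_caps(clauses: List[Tuple[str, str, str]]) -> str:
--     """Choose strongest perm per (fs,path) and produce one MDS caps string."""
--     best: Dict[Tuple[str, str], str] = {}
--     for fs, path, perm in clauses:
--         cur = best.get((fs, path))
--         if cur is None or _PERM_ORDER.get(perm, 0) > _PERM_ORDER.get(cur, 0):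
--             best[(fs, path)] = perm
--     ordered = sorted(best.items(), key=lambda kv: (kv[0][0], kv[0][1]))
--     return ", ".join(f"allow {perm} fsname={fs} path={path}" for (fs, path), perm in ordered)
-- ===== SOURCE B (Python) =====
-- _PERM_ORDER = {"r": 0, "rw": 1, "rwps": 2}
--
-- def _strongest(clauses, fs, path):
--     best = None
--     for cfs, cpath, perm in clauses:
--         if (cfs, cpath) == (fs, path) and (best is None or _PERM_ORDER.get(perm, 0) > _PERM_ORDER.get(best, 0)):
--             best = perm
--     return best
--
-- def _format_mds_caps(clauses):
--     keys = sorted({(fs, path) for fs, path, _ in clauses})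
--     return ", ".join(
--         f"allow {_strongest(clauses, fs, path)} fsname={fs} path={path}" for fs, path in keys
--     )
-- ===== Notes on version B (the rewrite author's own statement) =====
-- stated objective: alternative
-- what changed: Replaces the single-pass dict aggregation (hash-dedup then sort the items) by sorting the distinct (fs,path) keys directly and computing the strongest perm for each key with a per-key linear scan of the clauses.
import Mathlib
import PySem

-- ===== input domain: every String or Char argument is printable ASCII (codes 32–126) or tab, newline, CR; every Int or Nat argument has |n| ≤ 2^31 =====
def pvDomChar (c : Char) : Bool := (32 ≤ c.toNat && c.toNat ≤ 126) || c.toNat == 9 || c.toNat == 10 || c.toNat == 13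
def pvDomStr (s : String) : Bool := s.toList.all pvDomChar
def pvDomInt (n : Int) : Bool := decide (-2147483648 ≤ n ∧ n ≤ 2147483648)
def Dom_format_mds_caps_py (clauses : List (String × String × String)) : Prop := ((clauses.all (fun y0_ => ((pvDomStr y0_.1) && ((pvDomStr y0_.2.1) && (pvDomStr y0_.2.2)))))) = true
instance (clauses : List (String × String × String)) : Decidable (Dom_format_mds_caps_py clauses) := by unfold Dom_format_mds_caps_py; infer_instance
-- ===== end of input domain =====

-- B replaces A's dict aggregation by sorted distinct keys + a per-key strongest scan (alternative structure, not faster).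
-- B replaces A's dict aggregation by sorted distinct keys + a per-key strongest scan (alternative structure, not faster).
-- ===== PORT A =====
def pvPermOrder : PySem.Dict String Int :=
  PySem.Dict.ofList [("r", 0), ("rw", 1), ("rwps", 2)]

-- body of A's 'for fs, path, perm in clauses' loop ('cur is None or …' written as match)
def pvStepA (d : PySem.Dict (String × String) String) (c : String × String × String) :
    PySem.Dict (String × String) String :=
  match d.get? (c.1, c.2.1) with
  | none => d.insert (c.1, c.2.1) c.2.2
  | some cur =>
      if pvPermOrder.getD c.2.2 0 > pvPermOrder.getD cur 0 then d.insert (c.1, c.2.1) c.2.2 else d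

def format_mds_caps_py (clauses : List (String × String × String)) : String :=
  PySem.Str.join ", "
    ((PySem.List.sorted2 (clauses.foldl pvStepA PySem.Dict.empty).items
        (fun kv => kv.1.1) (fun kv => kv.1.2)).map
      (fun kv => "allow " ++ kv.2 ++ " fsname=" ++ kv.1.1 ++ " path=" ++ kv.1.2))

-- ===== PORT B =====
-- one step of _strongest's loop body (the 'and'/'or' short-circuit written as match)
def pvStrongestStep (fs path : String) (best : Option String) (c : String × String × String) :
    Option String :=
  if (c.1, c.2.1) = (fs, path) then
    match best with
    | none => some c.2.2
    | some b => if pvPermOrder.getD c.2.2 0 > pvPermOrder.getD b 0 then some c.2.2 else best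
  else best

def pvStrongest (clauses : List (String × String × String)) (fs path : String) : Option String :=
  clauses.foldl (pvStrongestStep fs path) none

-- f-string renders None as "None" (unreachable: every sorted key occurs in clauses)
def format_mds_caps_py_alt (clauses : List (String × String × String)) : String :=
  PySem.Str.join ", "
    ((PySem.List.sorted2 (PySem.Set.ofList (clauses.map (fun c => (c.1, c.2.1))))
        (fun k => k.1) (fun k => k.2)).map
      (fun k =>
        "allow " ++ (pvStrongest clauses k.1 k.2).getD "None" ++ " fsname=" ++ k.1 ++ " path=" ++ k.2))

-- ===== PRECONDITION & SPEC =====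
def Spec_format_mds_caps_py (clauses : List (String × String × String)) (out : String) : Prop := out = format_mds_caps_py_alt clauses
instance (clauses : List (String × String × String)) (out : String) : Decidable (Spec_format_mds_caps_py clauses out) := by unfold Spec_format_mds_caps_py; infer_instance

-- ===== CLAIM (what is proved, stated in full; the proofs are below) =====
def Claim_equal_format_mds_caps_py : Prop := ∀ (clauses : List (String × String × String)), Dom_format_mds_caps_py clauses → Spec_format_mds_caps_py clauses (format_mds_caps_py clauses)

-- ===== LEMMAS AND PROOFS =====

lemma pv_keys_contains (d : PySem.Dict (String × String) String) (k : String × String) :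
    PySem.Set.contains d.keys k = d.contains k := by
  rw [Bool.eq_iff_iff]
  simp only [PySem.Set.contains, PySem.Dict.keys, PySem.Dict.contains, List.elem_iff,
    List.mem_map, List.any_eq_true, beq_iff_eq]

-- one step of A's loop adds the clause's key to the key set (in first-occurrence order)
lemma pv_keys_step (d : PySem.Dict (String × String) String) (c : String × String × String) :
    (pvStepA d c).keys = PySem.Set.add d.keys (c.1, c.2.1) := by
  unfold pvStepA PySem.Set.add
  rw [pv_keys_contains]
  cases h : d.get? (c.1, c.2.1) with
  | none =>
      have hc : d.contains (c.1, c.2.1) = false := by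
        rw [PySem.Dict.contains_eq_isSome_get?, h]; rfl
      simp [hc, PySem.Dict.keys_insert_of_not_contains _ _ hc]
  | some cur =>
      have hc : d.contains (c.1, c.2.1) = true := by
        rw [PySem.Dict.contains_eq_isSome_get?, h]; rfl
      simp only [hc, if_true]
      split <;> simp [PySem.Dict.keys_insert_of_contains _ _ hc]

lemma pv_keys_fold (p : List (String × String × String)) :
    ∀ (d : PySem.Dict (String × String) String),
    (p.foldl pvStepA d).keys = PySem.Set.update d.keys (p.map (fun c => (c.1, c.2.1))) := by
  induction p with
  | nil => intro d; rfl
  | cons c p ih =>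
      intro d
      simp only [List.foldl_cons, List.map_cons]
      rw [ih, PySem.Set.update, pv_keys_step]
      rfl

-- pointwise: A's dict lookup after its fold IS B's per-key strongest scan
lemma pv_get_fold (p : List (String × String × String)) :
    ∀ (d : PySem.Dict (String × String) String) (fs path : String),
    (p.foldl pvStepA d).get? (fs, path) = p.foldl (pvStrongestStep fs path) (d.get? (fs, path)) := by
  induction p with
  | nil => intro d fs path; rfl
  | cons c p ih =>
      intro d fs path
      simp only [List.foldl_cons]
      rw [ih]
      congr 1
      unfold pvStepA pvStrongestStep
      by_cases hk : (c.1, c.2.1) = (fs, path)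
      · rw [hk]
        cases h : d.get? (fs, path) with
        | none => simp [PySem.Dict.get?_insert_self]
        | some cur =>
            simp only [h, if_true]
            split
            · rw [PySem.Dict.get?_insert_self]
            · exact h
      · cases h : d.get? (c.1, c.2.1) with
        | none => simp [hk, PySem.Dict.get?_insert_of_ne _ _ (fun he => hk he.symm)]
        | some cur =>
            simp only [hk, if_false]
            split
            · exact PySem.Dict.get?_insert_of_ne _ _ (fun he => hk he.symm)
            · rfl

-- insertion sort commutes with mapping a key-preserving function
lemma pv_insertBy_map {α β : Type} (f : α → β) (bb : β → β → Bool) (ba : α → α → Bool)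
    (h : ∀ a a', bb (f a) (f a') = ba a a') (ys : List α) (x : α) :
    PySem.List.insertBy bb (f x) (ys.map f) = (PySem.List.insertBy ba x ys).map f := by
  induction ys with
  | nil => rfl
  | cons y ys ih =>
      simp only [List.map_cons, PySem.List.insertBy, h]
      split <;> simp_all

lemma pv_foldl_insertBy_map {α β : Type} (f : α → β) (bb : β → β → Bool) (ba : α → α → Bool)
    (h : ∀ a a', bb (f a) (f a') = ba a a') (xs : List α) :
    ∀ (acc : List α),
    (xs.map f).foldl (fun a x => PySem.List.insertBy bb x a) (acc.map f)
      = (xs.foldl (fun a x => PySem.List.insertBy ba x a) acc).map f := by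
  induction xs with
  | nil => intro acc; rfl
  | cons x xs ih =>
      intro acc
      simp only [List.map_cons, List.foldl_cons]
      rw [pv_insertBy_map f bb ba h, ih]

lemma pv_main (clauses : List (String × String × String)) :
    format_mds_caps_py clauses = format_mds_caps_py_alt clauses := by
  unfold format_mds_caps_py format_mds_caps_py_alt
  have hkeys : (clauses.foldl pvStepA PySem.Dict.empty).keys
      = PySem.Set.ofList (clauses.map (fun c => (c.1, c.2.1))) := by
    rw [pv_keys_fold, PySem.Dict.keys_empty]; rfl
  have hnd : (clauses.foldl pvStepA PySem.Dict.empty).keys.Nodup := by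
    rw [hkeys]; exact PySem.Set.nodup_ofList _
  have hitems : (clauses.foldl pvStepA PySem.Dict.empty).items
      = (PySem.Set.ofList (clauses.map (fun c => (c.1, c.2.1)))).map
          (fun k => (k, (pvStrongest clauses k.1 k.2).getD "None")) := by
    rw [PySem.Dict.items_eq_map_keys _ hnd "None", hkeys]
    apply List.map_congr_left
    intro k _
    obtain ⟨a, b⟩ := k
    simp only [PySem.Dict.getD, pv_get_fold, PySem.Dict.get?_empty, pvStrongest]
  rw [hitems]
  have hs : PySem.List.sorted2
        ((PySem.Set.ofList (clauses.map (fun c => (c.1, c.2.1)))).map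
          (fun k => (k, (pvStrongest clauses k.1 k.2).getD "None")))
        (fun kv => kv.1.1) (fun kv => kv.1.2)
      = (PySem.List.sorted2 (PySem.Set.ofList (clauses.map (fun c => (c.1, c.2.1))))
          (fun k => k.1) (fun k => k.2)).map
          (fun k => (k, (pvStrongest clauses k.1 k.2).getD "None")) := by
    simp only [PySem.List.sorted2]
    exact pv_foldl_insertBy_map _ _ _ (fun a a' => rfl) _ []
  rw [hs, List.map_map]
  rfl

-- ===== VERDICT (by name: the statement is the Claim_ definition above) =====
theorem format_mds_caps_py_spec : Claim_equal_format_mds_caps_py := by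
  intro clauses _
  unfold Spec_format_mds_caps_py
  exact pv_main clauses
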